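-- pv_equiv track=rewrite | github.com/gabelli-lucia/e-class | find_match.py | find_matching_rows
-- ===== SOURCE A (Python) =====
-- def find_matching_rows(data1, data2):
--     matching_indices = []
--     for i, row1 in enumerate(data1):
--         for j, row2 in enumerate(data2):
--             # Check for matching elements except for the first one (study plan) and the last three (matricola, channel and semester)
--             if all(cell1.lower() == cell2.lower() for cell1, cell2 in zip(row1[1:-3], row2[1:-3])):
--                 # Check the last element for the special matching conditions
--                 if row1[-1].lower() == row2[-1].lower() or \
--                    ('1 : primo anno' in (row1[-1].lower(), row2[-1].lower()) and '1 : first year - msc degree' in (row1[-1].lower(), row2[-1].lower())) or \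
--                    ('2 : secondo anno' in (row1[-1].lower(), row2[-1].lower()) and '2 : second year - msc degree' in (row1[-1].lower(), row2[-1].lower())):
--                     matching_indices.append((i, j))
--     return matching_indices
-- ===== SOURCE B (Python) =====
-- def find_matching_rows(data1, data2):
--     # Bucket data2 rows by a canonicalized last cell (lowercased, with the
--     # English MSc-year labels mapped to their Italian equivalents), so only
--     # rows with a compatible last cell are scanned per data1 row.
--     if not data1 or not data2:
--         return []
--
--     def canon(row):
--         last = row[-1].lower()
--         if last == '1 : first year - msc degree':
--             last = '1 : primo anno'
--         elif last == '2 : second year - msc degree':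
--             last = '2 : secondo anno'
--         return [cell.lower() for cell in row[1:-3]], last
--
--     buckets = {}
--     for j, row in enumerate(data2):
--         mid, last = canon(row)
--         buckets.setdefault(last, []).append((j, mid))
--
--     out = []
--     for i, row in enumerate(data1):
--         mid, last = canon(row)
--         for j, mid2 in buckets.get(last, []):
--             k = min(len(mid), len(mid2))
--             if mid[:k] == mid2[:k]:
--                 out.append((i, j))
--     return out
-- ===== Notes on version B (the rewrite author's own statement) =====
-- stated objective: faster
-- what changed: B canonicalizes every row once (lowercased middle cells, last cell normalized so the equivalent Italian/English year labels get one key) and buckets data2 rows in a dict keyed by that canonical last cell, so each data1 row only scans its bucket instead of re-lowercasing and re-comparing against every data2 row.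
import Mathlib
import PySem

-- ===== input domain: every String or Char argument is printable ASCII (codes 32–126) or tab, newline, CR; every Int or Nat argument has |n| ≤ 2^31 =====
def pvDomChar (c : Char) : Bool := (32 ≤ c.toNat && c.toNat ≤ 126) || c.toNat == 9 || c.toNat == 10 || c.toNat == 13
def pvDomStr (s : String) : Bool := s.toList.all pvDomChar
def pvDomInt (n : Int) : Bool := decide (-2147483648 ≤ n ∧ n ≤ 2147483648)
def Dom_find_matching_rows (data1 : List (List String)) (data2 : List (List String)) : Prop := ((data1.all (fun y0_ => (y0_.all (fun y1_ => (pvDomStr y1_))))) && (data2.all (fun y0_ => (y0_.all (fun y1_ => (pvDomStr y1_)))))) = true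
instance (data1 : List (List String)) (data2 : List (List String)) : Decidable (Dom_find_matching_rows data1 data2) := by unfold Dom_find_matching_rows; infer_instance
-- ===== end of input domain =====

-- B buckets data2 rows once in a dict keyed by a canonicalized last cell (lowercased, the
-- English MSc-year labels mapped to the Italian ones) and lowercases each row once, instead
-- of A's re-lowercasing scan of all of data2 for every data1 row. Return-value equivalence.

-- ===== PORT A =====
-- '<s> in (l1, l2)' is 's == l1 or s == l2'
def pvLastCondA (l1 l2 : String) : Bool :=
  l1 == l2 ||
  ((("1 : primo anno" == l1) || ("1 : primo anno" == l2)) &&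
   (("1 : first year - msc degree" == l1) || ("1 : first year - msc degree" == l2))) ||
  ((("2 : secondo anno" == l1) || ("2 : secondo anno" == l2)) &&
   (("2 : second year - msc degree" == l1) || ("2 : second year - msc degree" == l2)))

-- row[-1]: pyGet? (none = IndexError, excluded by Pre_; .getD "" is only reached outside Pre_)
def find_matching_rows (data1 : List (List String)) (data2 : List (List String)) : List (Int × Int) :=
  (PySem.List.enumerate data1 0).foldl (fun acc p =>
    (PySem.List.enumerate data2 0).foldl (fun acc2 q =>
      if ((PySem.List.slice p.2 (some 1) (some (-3))).zip
            (PySem.List.slice q.2 (some 1) (some (-3)))).all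
            (fun c => PySem.Str.lower c.1 == PySem.Str.lower c.2) then
        if pvLastCondA (PySem.Str.lower ((PySem.List.pyGet? p.2 (-1)).getD ""))
                       (PySem.Str.lower ((PySem.List.pyGet? q.2 (-1)).getD "")) then
          acc2 ++ [(p.1, q.1)]
        else acc2
      else acc2) acc) []

-- ===== PORT B =====
def pvCanonLast (row : List String) : String :=
  let l := PySem.Str.lower ((PySem.List.pyGet? row (-1)).getD "")
  if l == "1 : first year - msc degree" then "1 : primo anno"
  else if l == "2 : second year - msc degree" then "2 : secondo anno"
  else l

def pvCanonMid (row : List String) : List String :=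
  (PySem.List.slice row (some 1) (some (-3))).map PySem.Str.lower

def pvPrefixEq (m1 m2 : List String) : Bool :=
  let k := min m1.length m2.length
  m1.take k == m2.take k

def find_matching_rows_alt (data1 : List (List String)) (data2 : List (List String)) : List (Int × Int) :=
  if data1.isEmpty || data2.isEmpty then []
  else
    let buckets : PySem.Dict String (List (Int × List String)) :=
      (PySem.List.enumerate data2 0).foldl
        (fun d q =>
          let last := pvCanonLast q.2
          d.insert last (d.getD last [] ++ [(q.1, pvCanonMid q.2)]))
        PySem.Dict.empty
    (PySem.List.enumerate data1 0).foldl (fun acc p =>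
      let mid := pvCanonMid p.2
      (buckets.getD (pvCanonLast p.2) []).foldl (fun acc2 q =>
        if pvPrefixEq mid q.2 then acc2 ++ [(p.1, q.1)] else acc2) acc) []

-- ===== PRECONDITION & SPEC =====
-- Python A raises IndexError (row[-1]) exactly when both tables are nonempty and some row is
-- empty; Pre_ admits everything else, i.e. exactly the inputs on which A returns.
def Pre_find_matching_rows (data1 : List (List String)) (data2 : List (List String)) : Prop :=
  data1 = [] ∨ data2 = [] ∨ ((∀ r ∈ data1, r ≠ []) ∧ (∀ r ∈ data2, r ≠ []))
instance (data1 : List (List String)) (data2 : List (List String)) : Decidable (Pre_find_matching_rows data1 data2) := by unfold Pre_find_matching_rows; infer_instance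

def pvWitness_find_matching_rows : List (List String) × List (List String) :=
  ([["plan", "Alice", "1 : primo anno"]], [["plan2", "alice", "1 : First Year - MSc Degree"]])

def Spec_find_matching_rows (data1 : List (List String)) (data2 : List (List String)) (out : List (Int × Int)) : Prop := out = find_matching_rows_alt data1 data2
instance (data1 : List (List String)) (data2 : List (List String)) (out : List (Int × Int)) : Decidable (Spec_find_matching_rows data1 data2 out) := by unfold Spec_find_matching_rows; infer_instance

-- ===== CLAIM (what is proved, stated in full; the proofs are below) =====
def Claim_equal_find_matching_rows : Prop := ∀ (data1 : List (List String)) (data2 : List (List String)), Dom_find_matching_rows data1 data2 → Pre_find_matching_rows data1 data2 → Spec_find_matching_rows data1 data2 (find_matching_rows data1 data2)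

-- ===== LEMMAS AND PROOFS =====

-- the middle-cells test: all(lower = lower) over the zip ⟺ the lowered lists agree on their common prefix
lemma pv_zip_all_lower (a b : List String) :
    ((a.zip b).all (fun c => PySem.Str.lower c.1 == PySem.Str.lower c.2))
      = pvPrefixEq (a.map PySem.Str.lower) (b.map PySem.Str.lower) := by
  induction a generalizing b with
  | nil => simp [pvPrefixEq]
  | cons x xs ih =>
    cases b with
    | nil => simp [pvPrefixEq]
    | cons y ys =>
      simp only [List.zip_cons_cons, List.all_cons, List.map_cons, pvPrefixEq] at *
      simp [Nat.succ_min_succ, ih ys]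

def pvNorm (s : String) : String :=
  if s == "1 : first year - msc degree" then "1 : primo anno"
  else if s == "2 : second year - msc degree" then "2 : secondo anno"
  else s

-- the last-cell test of A ⟺ equality of the normalized last cells
lemma pv_lastCond_eq_norm (l1 l2 : String) : pvLastCondA l1 l2 = (pvNorm l1 == pvNorm l2) := by
  rw [Bool.eq_iff_iff]
  simp only [pvLastCondA, pvNorm, Bool.or_eq_true, Bool.and_eq_true, beq_iff_eq]
  split_ifs <;> (try simp_all) <;> tauto

lemma pv_canonLast_eq (row : List String) :
    pvCanonLast row = pvNorm (PySem.Str.lower ((PySem.List.pyGet? row (-1)).getD "")) := rfl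

-- the full pairwise condition of A, restated through B's canonical forms
lemma pv_cond_eq (r1 r2 : List String) :
    (((PySem.List.slice r1 (some 1) (some (-3))).zip
        (PySem.List.slice r2 (some 1) (some (-3)))).all
        (fun c => PySem.Str.lower c.1 == PySem.Str.lower c.2)
     && pvLastCondA (PySem.Str.lower ((PySem.List.pyGet? r1 (-1)).getD ""))
                    (PySem.Str.lower ((PySem.List.pyGet? r2 (-1)).getD "")))
    = (pvPrefixEq (pvCanonMid r1) (pvCanonMid r2) && (pvCanonLast r1 == pvCanonLast r2)) := by
  rw [pv_zip_all_lower, pv_lastCond_eq_norm, pv_canonLast_eq, pv_canonLast_eq]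
  rfl

-- the multidict built by 'setdefault(last, []).append(...)', read back
lemma pv_buckets_getD (L : List (Int × List String)) (d : PySem.Dict String (List (Int × List String)))
    (k : String) :
    (L.foldl (fun d q =>
        d.insert (pvCanonLast q.2) (d.getD (pvCanonLast q.2) [] ++ [(q.1, pvCanonMid q.2)])) d).getD k []
      = d.getD k [] ++ (L.filter (fun q => pvCanonLast q.2 == k)).map (fun q => (q.1, pvCanonMid q.2)) := by
  induction L generalizing d with
  | nil => simp
  | cons x xs ih =>
    simp only [List.foldl_cons, List.filter_cons, ih]
    rw [PySem.Dict.getD_insert]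
    by_cases h : pvCanonLast x.2 = k
    · simp [h, List.append_assoc]
    · simp [h, Ne.symm h]

lemma pv_if_if (a b : Bool) (x : List (Int × Int)) (v : Int × Int) :
    (if a then (if b then x ++ [v] else x) else x) = (if a && b then x ++ [v] else x) := by
  cases a <;> cases b <;> simp

-- A as a flatMap of per-row matches
lemma pv_A_flatMap (data1 data2 : List (List String)) :
    find_matching_rows data1 data2
      = (PySem.List.enumerate data1 0).flatMap (fun p =>
          (((PySem.List.enumerate data2 0).filter (fun q =>
              pvPrefixEq (pvCanonMid p.2) (pvCanonMid q.2)
                && (pvCanonLast p.2 == pvCanonLast q.2))).map (fun q => (p.1, q.1)))) := by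
  unfold find_matching_rows
  rw [PySem.List.foldl_congr_mem
      (g := fun acc p => acc ++ (((PySem.List.enumerate data2 0).filter (fun q =>
              pvPrefixEq (pvCanonMid p.2) (pvCanonMid q.2)
                && (pvCanonLast p.2 == pvCanonLast q.2))).map (fun q => (p.1, q.1))))]
  · rw [PySem.List.foldl_append_eq_flatMap]; simp
  · intro acc p _
    simp only [pv_if_if, pv_cond_eq]
    rw [PySem.List.foldl_append_if]

-- B as the same flatMap
set_option maxHeartbeats 1000000 in
lemma pv_B_flatMap (data1 data2 : List (List String)) (h1 : data1.isEmpty = false)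
    (h2 : data2.isEmpty = false) :
    find_matching_rows_alt data1 data2
      = (PySem.List.enumerate data1 0).flatMap (fun p =>
          (((PySem.List.enumerate data2 0).filter (fun q =>
              pvPrefixEq (pvCanonMid p.2) (pvCanonMid q.2)
                && (pvCanonLast p.2 == pvCanonLast q.2))).map (fun q => (p.1, q.1)))) := by
  unfold find_matching_rows_alt
  rw [h1, h2]
  simp only [Bool.or_self, Bool.false_eq_true, if_false]
  rw [PySem.List.foldl_congr_mem
      (g := fun acc p => acc ++ (((PySem.List.enumerate data2 0).filter (fun q =>
              pvPrefixEq (pvCanonMid p.2) (pvCanonMid q.2)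
                && (pvCanonLast p.2 == pvCanonLast q.2))).map (fun q => (p.1, q.1))))]
  · rw [PySem.List.foldl_append_eq_flatMap]; simp
  · intro acc p _
    simp only [pv_buckets_getD, PySem.List.foldl_append_if]
    simp only [PySem.Dict.getD_empty, List.nil_append, List.filter_map, List.map_map]
    rw [List.filter_filter]
    simp only [Function.comp_def]
    refine congrArg _ (congrArg _ (List.filter_congr ?_))
    intro q _
    congr 1
    simp [BEq.comm]

-- ===== VERDICT (by name: the statement is the Claim_ definition above) =====
theorem find_matching_rows_spec : Claim_equal_find_matching_rows := by
  intro data1 data2 _ _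
  unfold Spec_find_matching_rows
  cases h1 : data1.isEmpty with
  | true =>
    rw [List.isEmpty_iff] at h1
    subst h1
    simp [find_matching_rows, find_matching_rows_alt, PySem.List.enumerate]
  | false =>
    cases h2 : data2.isEmpty with
    | true =>
      rw [List.isEmpty_iff] at h2
      subst h2
      rw [pv_A_flatMap]
      simp [find_matching_rows_alt, PySem.List.enumerate]
    | false =>
      rw [pv_A_flatMap, pv_B_flatMap data1 data2 h1 h2]
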